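-- pv_equiv track=rewrite | github.com/isthabram/H-BRS-Artificial-Intelligence-assignment-04-informed-search-habrami- | heuristic.py | manhattan_helper
-- ===== SOURCE A (Python) =====
-- def manhattan_helper(num: int, x_: int, y_: int) -> int:
--     goal = [[0, 1, 2],
--             [3, 4, 5],
--             [6, 7, 8]]
--
--     dist = 0
--
--     for x, row in enumerate(goal):
--         for y, tile in enumerate(row):
--             if(num == goal[x][y]):
--                 dist = abs(x-x_) + abs(y-y_)
--                 break
--
--     return dist
-- ===== SOURCE B (Python) =====
-- def manhattan_helper(num: int, x_: int, y_: int) -> int: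
--     if 0 <= num <= 8:
--         return abs(num // 3 - x_) + abs(num % 3 - y_)
--     return 0
-- ===== Notes on version B (the rewrite author's own statement) =====
-- stated objective: simpler
-- what changed: Replaced the nested 3x3 grid scan for the tile's goal position with the closed-form coordinates (num//3, num%3) guarded by a 0..8 range check, keeping A's default of 0 for tiles outside the grid.
import Mathlib
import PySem

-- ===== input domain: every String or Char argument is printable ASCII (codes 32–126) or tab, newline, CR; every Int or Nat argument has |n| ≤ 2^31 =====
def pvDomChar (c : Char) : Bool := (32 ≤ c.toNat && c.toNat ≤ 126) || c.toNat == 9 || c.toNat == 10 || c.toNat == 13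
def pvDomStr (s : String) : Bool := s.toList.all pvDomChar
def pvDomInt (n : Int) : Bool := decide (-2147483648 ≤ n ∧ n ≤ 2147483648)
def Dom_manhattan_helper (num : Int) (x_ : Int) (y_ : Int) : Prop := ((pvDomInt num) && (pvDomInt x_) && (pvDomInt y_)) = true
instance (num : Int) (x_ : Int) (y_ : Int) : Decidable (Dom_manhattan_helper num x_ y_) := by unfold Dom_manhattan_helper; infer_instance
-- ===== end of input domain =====

-- B replaces A's nested 3x3 goal-grid scan with the closed-form goal coordinates (num//3, num%3); objective: simpler.

-- ===== PORT A =====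
-- inner 'for y, tile in enumerate(row)' loop: 'break' after setting dist ends the row scan
def mhInner (num : Int) (x : Int) (x_ : Int) (y_ : Int) : List (Int × Int) → Int → Int
  | [], dist => dist
  | (y, tile) :: rest, dist =>
      if num == tile then |x - x_| + |y - y_|
      else mhInner num x x_ y_ rest dist

-- outer 'for x, row in enumerate(goal)' loop
def mhOuter (num : Int) (x_ : Int) (y_ : Int) : List (Int × List Int) → Int → Int
  | [], dist => dist
  | (x, row) :: rest, dist =>
      mhOuter num x_ y_ rest (mhInner num x x_ y_ (PySem.List.enumerate row) dist)

def manhattan_helper (num : Int) (x_ : Int) (y_ : Int) : Int :=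
  let goal : List (List Int) := [[0, 1, 2], [3, 4, 5], [6, 7, 8]]
  mhOuter num x_ y_ (PySem.List.enumerate goal) 0

-- ===== PORT B =====
def manhattan_helper_alt (num : Int) (x_ : Int) (y_ : Int) : Int :=
  if 0 ≤ num ∧ num ≤ 8 then
    |PySem.Int.floordiv num 3 - x_| + |PySem.Int.mod num 3 - y_|
  else 0

-- ===== PRECONDITION & SPEC =====
def Spec_manhattan_helper (num : Int) (x_ : Int) (y_ : Int) (out : Int) : Prop := out = manhattan_helper_alt num x_ y_
instance (num : Int) (x_ : Int) (y_ : Int) (out : Int) : Decidable (Spec_manhattan_helper num x_ y_ out) := by unfold Spec_manhattan_helper; infer_instance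

-- ===== CLAIM (what is proved, stated in full; the proofs are below) =====
def Claim_equal_manhattan_helper : Prop := ∀ (num : Int) (x_ : Int) (y_ : Int), Dom_manhattan_helper num x_ y_ → Spec_manhattan_helper num x_ y_ (manhattan_helper num x_ y_)

-- ===== LEMMAS AND PROOFS =====
-- ===== VERDICT (by name: the statement is the Claim_ definition above) =====
theorem manhattan_helper_spec : Claim_equal_manhattan_helper := by
  intro num x_ y_ _
  unfold Spec_manhattan_helper manhattan_helper manhattan_helper_alt
  simp only [PySem.List.enumerate, mhOuter, mhInner]
  by_cases h0 : num = 0 <;> by_cases h1 : num = 1 <;> by_cases h2 : num = 2 <;>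
    by_cases h3 : num = 3 <;> by_cases h4 : num = 4 <;> by_cases h5 : num = 5 <;>
    by_cases h6 : num = 6 <;> by_cases h7 : num = 7 <;> by_cases h8 : num = 8 <;>
    simp_all [PySem.Int.floordiv, PySem.Int.mod] <;> omega
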